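-- pv_equiv track=rewrite | github.com/SvetlaGeorgieva/HackBulgaria-Programming101 | week0/week0day2/31.5_member_of_nth_fib_lists/solution.py | member_of_nth_fib_lists
-- ===== SOURCE A (Python) =====
-- def nth_fib_lists(listA, listB, n):
--     if n == 1:
--         return listA
--     if n == 2:
--         return listB
--     if n > 2:
--         a = listA
--         b = listB
--         count = []
--         for i in range(3, n + 1):
--             count = a + b
--             a = b
--             b = count
--         return count
--
-- def member_of_nth_fib_lists(listA, listB, needle):
--     if(needle == listA or needle == listB):
--         return True
--
--     needle_length = len(needle)
--     length = 0
--
--     while ( length <= needle_length):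
--         for i in range(1, needle_length + 1):
--             needle_i = nth_fib_lists(listA, listB, i)
--             if (needle_i == needle):
--                 return True
--             else:
--                 length = len(needle_i)
--         return False
-- ===== SOURCE B (Python) =====
-- def member_of_nth_fib_lists(listA, listB, needle):
--     if needle == listA or needle == listB:
--         return True
--     n = len(needle)
--     a, b = listA, listB
--     for _ in range(3, n + 1):
--         if len(a) + len(b) > n:
--             # fib-list lengths never decrease from here on, so no later
--             # fib list can have the same length as the needle
--             return False
--         a, b = b, a + b
--         if b == needle:
--             return True
--     return False
-- ===== Notes on version B (the rewrite author's own statement) =====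
-- stated objective: faster
-- what changed: B builds the Fibonacci-concatenation lists incrementally in a single pass (instead of recomputing the i-th list from scratch for every i) and stops as soon as the next list would be longer than the needle.
import Mathlib
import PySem

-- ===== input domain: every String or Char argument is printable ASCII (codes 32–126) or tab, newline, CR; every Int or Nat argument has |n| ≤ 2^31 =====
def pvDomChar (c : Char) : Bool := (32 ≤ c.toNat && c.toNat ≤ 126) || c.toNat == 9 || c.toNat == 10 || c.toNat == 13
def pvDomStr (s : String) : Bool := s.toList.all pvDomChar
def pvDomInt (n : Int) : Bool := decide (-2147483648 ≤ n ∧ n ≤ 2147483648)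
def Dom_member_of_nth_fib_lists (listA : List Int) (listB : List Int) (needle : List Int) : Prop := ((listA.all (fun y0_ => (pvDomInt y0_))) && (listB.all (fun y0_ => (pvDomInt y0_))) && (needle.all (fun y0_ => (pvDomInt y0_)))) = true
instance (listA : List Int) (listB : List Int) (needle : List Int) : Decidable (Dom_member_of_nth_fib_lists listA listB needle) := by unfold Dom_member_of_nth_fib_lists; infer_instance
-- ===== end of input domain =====

-- B replaces A's recompute-from-scratch scan over fib-lists by one incremental pass with a
-- length-based early exit; intended as faster (a timing run could not confirm a ratio:
-- A timed out on every larger generated input where B still returned).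

-- ===== PORT A =====
-- Python helper nth_fib_lists; it implicitly returns None when n ≤ 0, ported as Option.
def nthFibListsA (listA listB : List Int) (n : Int) : Option (List Int) :=
  if n == 1 then some listA
  else if n == 2 then some listB
  else if n > 2 then
    some (((PySem.List.pyRange 3 (n + 1) 1).foldl
      (fun (st : List Int × List Int × List Int) _ =>
        (st.2.1, st.1 ++ st.2.1, st.1 ++ st.2.1)) (listA, listB, ([] : List Int))).2.2)
  else none

-- A's for-loop over range(1, needle_length+1): 'return True' on a match, 'return False' right
-- after the loop.  The variable 'length' written in the else branch is dead: the enclosing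
-- 'while length <= needle_length' is entered once (0 ≤ len(needle) always) and its body always
-- returns, so the loop condition is never re-tested and 'length' is dropped from the port.
def forLoopA (listA listB needle : List Int) : List Int → Bool
  | [] => false
  | i :: rest =>
      if nthFibListsA listA listB i == some needle then true
      else forLoopA listA listB needle rest

def member_of_nth_fib_lists (listA : List Int) (listB : List Int) (needle : List Int) : Bool :=
  if needle == listA || needle == listB then true
  else forLoopA listA listB needle (PySem.List.pyRange 1 ((needle.length : Int) + 1) 1)

-- ===== PORT B =====
-- B's for-loop over range(3, n+1) carrying the last two fib lists (a, b); early 'return False'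
-- when the next list would be longer than the needle, 'return True' on a match.
def memberLoopB (needle : List Int) (n : Int) : List Int → List Int → List Int → Bool
  | _, _, [] => false
  | a, b, _ :: rest =>
      if (a.length : Int) + (b.length : Int) > n then false
      else if (a ++ b) == needle then true
      else memberLoopB needle n b (a ++ b) rest

def member_of_nth_fib_lists_alt (listA : List Int) (listB : List Int) (needle : List Int) : Bool :=
  if needle == listA || needle == listB then true
  else memberLoopB needle (needle.length : Int) listA listB
         (PySem.List.pyRange 3 ((needle.length : Int) + 1) 1)

-- ===== PRECONDITION & SPEC =====
def Spec_member_of_nth_fib_lists (listA : List Int) (listB : List Int) (needle : List Int) (out : Bool) : Prop := out = member_of_nth_fib_lists_alt listA listB needle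
instance (listA : List Int) (listB : List Int) (needle : List Int) (out : Bool) : Decidable (Spec_member_of_nth_fib_lists listA listB needle out) := by unfold Spec_member_of_nth_fib_lists; infer_instance

-- ===== CLAIM (what is proved, stated in full; the proofs are below) =====
def Claim_equal_member_of_nth_fib_lists : Prop := ∀ (listA : List Int) (listB : List Int) (needle : List Int), Dom_member_of_nth_fib_lists listA listB needle → Spec_member_of_nth_fib_lists listA listB needle (member_of_nth_fib_lists listA listB needle)

-- ===== LEMMAS AND PROOFS =====

-- the mathematical fib-list sequence, 0-indexed: fibSeq 0 = listA = fib-list 1, etc.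
def fibSeq (listA listB : List Int) : Nat → List Int
  | 0 => listA
  | 1 => listB
  | (k+2) => fibSeq listA listB k ++ fibSeq listA listB (k+1)

lemma foldA_eq (lA lB : List Int) (l : List Int) : ∀ (j : Nat) (x : List Int),
    l.foldl (fun (st : List Int × List Int × List Int) _ =>
        (st.2.1, st.1 ++ st.2.1, st.1 ++ st.2.1)) (fibSeq lA lB j, fibSeq lA lB (j+1), x)
      = (fibSeq lA lB (j + l.length), fibSeq lA lB (j + l.length + 1),
         if l.length = 0 then x else fibSeq lA lB (j + l.length + 1)) := by
  induction l with
  | nil => simp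
  | cons h t ih =>
    intro j x
    have e2 : fibSeq lA lB j ++ fibSeq lA lB (j+1) = fibSeq lA lB ((j+1)+1) := rfl
    simp only [List.foldl_cons, e2]
    rw [ih (j+1)]
    rcases Nat.eq_zero_or_pos t.length with ht | ht
    · simp [ht]
    · have hne : t.length ≠ 0 := by omega
      have harith : j + 1 + t.length = j + (t.length + 1) := by omega
      simp [hne, harith]

lemma nthFibListsA_eq (lA lB : List Int) (k : Nat) :
    nthFibListsA lA lB ((k : Int) + 1) = some (fibSeq lA lB k) := by
  match k with
  | 0 => rfl
  | 1 => rfl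
  | (m+2) =>
    have h1 : ((((m : Int) + 2) + 1) == 1) = false := by
      simp only [beq_eq_false_iff_ne]; omega
    have h2 : ((((m : Int) + 2) + 1) == 2) = false := by
      simp only [beq_eq_false_iff_ne]; omega
    have h3 : ((m : Int) + 2) + 1 > 2 := by omega
    have hlen : (PySem.List.pyRange 3 ((((m : Nat) + 2 : Nat) : Int) + 1 + 1) 1).length = m + 1 := by
      rw [PySem.List.length_pyRange_one]
      push_cast
      omega
    unfold nthFibListsA
    push_cast
    simp only [h1, h2, h3, if_true, Bool.false_eq_true, if_false]
    have := foldA_eq lA lB (PySem.List.pyRange 3 ((((m : Nat) + 2 : Nat) : Int) + 1 + 1) 1) 0 []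
    push_cast at this hlen ⊢
    rw [show (fibSeq lA lB 0, fibSeq lA lB 1, ([] : List Int)) = (lA, lB, ([] : List Int)) from rfl] at this
    rw [this, hlen]
    simp

lemma forLoopA_true_iff (lA lB needle : List Int) : ∀ (l : List Int),
    (forLoopA lA lB needle l = true) ↔ ∃ i ∈ l, nthFibListsA lA lB i = some needle := by
  intro l
  induction l with
  | nil => simp [forLoopA]
  | cons h t ih =>
    simp only [forLoopA]
    by_cases hh : nthFibListsA lA lB h = some needle
    · simp [hh]
    · have : (nthFibListsA lA lB h == some needle) = false := by simp [hh]
      simp [this, ih, hh]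

-- fib-list lengths are non-decreasing from index 1 on
lemma fibSeq_len_mono (lA lB : List Int) (j : Nat) : ∀ (t : Nat),
    (fibSeq lA lB (j + 2)).length ≤ (fibSeq lA lB (j + 2 + t)).length := by
  intro t
  induction t with
  | zero => exact le_refl _
  | succ s ih =>
    refine le_trans ih ?_
    have e : fibSeq lA lB (j + 2 + (s + 1)) = fibSeq lA lB (j + 1 + s) ++ fibSeq lA lB (j + 2 + s) := by
      have h1 : j + 2 + (s + 1) = (j + 1 + s) + 2 := by omega
      have h2 : (j + 1 + s) + 1 = j + 2 + s := by omega
      rw [h1, show fibSeq lA lB ((j+1+s)+2) = fibSeq lA lB (j+1+s) ++ fibSeq lA lB ((j+1+s)+1) from rfl, h2]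
    rw [e, List.length_append]
    exact Nat.le_add_left _ _

lemma memberLoopB_true_iff (lA lB needle : List Int) : ∀ (l : List Int) (j : Nat),
    (memberLoopB needle (needle.length : Int) (fibSeq lA lB j) (fibSeq lA lB (j+1)) l = true)
    ↔ ∃ t : Nat, t < l.length ∧ fibSeq lA lB (j + 2 + t) = needle := by
  intro l
  induction l with
  | nil => intro j; simp [memberLoopB]
  | cons h rest ih =>
    intro j
    simp only [memberLoopB]
    have hcat : fibSeq lA lB j ++ fibSeq lA lB (j+1) = fibSeq lA lB (j+2) := rfl
    by_cases hbig : ((fibSeq lA lB j).length : Int) + ((fibSeq lA lB (j+1)).length : Int) > (needle.length : Int)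
    · simp only [hbig, if_true]
      constructor
      · intro hfalse; cases hfalse
      · rintro ⟨t, _, hteq⟩
        exfalso
        have h2 : (fibSeq lA lB (j + 2)).length ≤ (fibSeq lA lB (j + 2 + t)).length :=
          fibSeq_len_mono lA lB j t
        have h3 : (fibSeq lA lB (j + 2)).length = (fibSeq lA lB j).length + (fibSeq lA lB (j+1)).length := by
          rw [← hcat, List.length_append]
        have h4 : (fibSeq lA lB (j + 2 + t)).length = needle.length := by rw [hteq]
        omega
    · simp only [hbig, if_false]
      by_cases heq : fibSeq lA lB j ++ fibSeq lA lB (j+1) = needle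
      · have : (fibSeq lA lB j ++ fibSeq lA lB (j+1) == needle) = true := by simp [heq]
        simp only [this, if_true, true_iff]
        exact ⟨0, by simp, by rw [← hcat, heq]⟩
      · have hbeq : (fibSeq lA lB j ++ fibSeq lA lB (j+1) == needle) = false := by simp [heq]
        simp only [hbeq, Bool.false_eq_true, if_false]
        rw [hcat]
        have := ih (j+1)
        rw [show (j+1)+1 = j+2 from rfl] at this
        rw [this]
        constructor
        · rintro ⟨t, htl, hteq⟩
          exact ⟨t + 1, by simp; omega, by rw [show j + 2 + (t+1) = j + 1 + 2 + t by omega]; exact hteq⟩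
        · rintro ⟨t, htl, hteq⟩
          match t, htl with
          | 0, _ =>
            exfalso; apply heq; rw [hcat]; simpa using hteq
          | (s+1), htl =>
            refine ⟨s, by simp at htl; omega, ?_⟩
            rw [show j + 1 + 2 + s = j + 2 + (s+1) by omega]
            exact hteq

-- ===== VERDICT (by name: the statement is the Claim_ definition above) =====
theorem member_of_nth_fib_lists_spec : Claim_equal_member_of_nth_fib_lists := by
  intro lA lB needle _
  unfold Spec_member_of_nth_fib_lists member_of_nth_fib_lists member_of_nth_fib_lists_alt
  by_cases hguard : (needle == lA || needle == lB) = true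
  · simp [hguard]
  · rw [if_neg hguard, if_neg hguard]
    rw [Bool.eq_iff_iff]
    rw [forLoopA_true_iff]
    have hB := memberLoopB_true_iff lA lB needle
      (PySem.List.pyRange 3 ((needle.length : Int) + 1) 1) 0
    rw [show fibSeq lA lB 0 = lA from rfl, show fibSeq lA lB (0+1) = lB from rfl] at hB
    rw [hB]
    have hlenB : (PySem.List.pyRange 3 ((needle.length : Int) + 1) 1).length
        = needle.length - 2 := by
      rw [PySem.List.length_pyRange_one]
      omega
    rw [hlenB]
    have hnA : needle ≠ lA := by intro h; exact hguard (by simp [h])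
    have hnB : needle ≠ lB := by intro h; exact hguard (by simp [h])
    constructor
    · rintro ⟨i, hi, hieq⟩
      rw [PySem.List.mem_pyRange_one] at hi
      obtain ⟨h1, h2⟩ := hi
      set k : Nat := (i - 1).toNat with hk
      have hik : i = (k : Int) + 1 := by omega
      rw [hik, nthFibListsA_eq] at hieq
      have hfk : fibSeq lA lB k = needle := by injection hieq
      match k, hfk with
      | 0, hfk => exact absurd hfk.symm hnA
      | 1, hfk => exact absurd hfk.symm hnB
      | (m+2), hfk =>
        refine ⟨m, ?_, by rw [show 0 + 2 + m = m + 2 by omega]; exact hfk⟩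
        have h2' := h2
        rw [hik] at h2'
        push_cast at h2'
        omega
    · rintro ⟨t, htl, hteq⟩
      refine ⟨((t : Int) + 2) + 1, ?_, ?_⟩
      · rw [PySem.List.mem_pyRange_one]
        constructor <;> [omega; (push_cast; omega)]
      · rw [show ((t : Int) + 2) + 1 = ((t + 2 : Nat) : Int) + 1 by push_cast; ring,
          nthFibListsA_eq]
        rw [show t + 2 = 0 + 2 + t by omega, hteq]
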